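-- pv_equiv track=rewrite | github.com/Lurik13/PokeLinux | src/pokedle/clue.py | get_weaknesses_line
-- ===== SOURCE A (Python) =====
-- def get_weaknesses_line(number_of_weaknesses_by_line, remaining_weakness, max_len):
--     line = ""
--     i = 0
--     if (len(remaining_weakness)):
--         longest_weakness = min(remaining_weakness, key=len)
--         remaining_weakness.remove(longest_weakness)
--         line = longest_weakness
--         while len(remaining_weakness) and i + 1 < number_of_weaknesses_by_line:
--             longest_weakness = min(remaining_weakness, key=len)
--             remaining_weakness.remove(longest_weakness)
--             if len(line + ', ' + longest_weakness) <= max_len: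
--                 line += ', ' + longest_weakness
--             else:
--                 remaining_weakness.append(longest_weakness)
--                 break
--             i += 1
--     return line
-- ===== SOURCE B (Python) =====
-- def get_weaknesses_line(number_of_weaknesses_by_line, remaining_weakness, max_len):
--     # Return value only: computes the same line as A via one stable sort by length
--     # instead of A's repeated min()-scan-and-remove (A also mutates the list; B does not).
--     order = sorted(remaining_weakness, key=len)
--     if not order:
--         return ""
--     line = order[0]
--     count = 1
--     for w in order[1:]:
--         if count >= number_of_weaknesses_by_line:
--             break
--         if len(line) + 2 + len(w) > max_len:
--             break
--         line += ', ' + w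
--         count += 1
--     return line
-- ===== Notes on version B (the rewrite author's own statement) =====
-- stated objective: faster
-- what changed: A repeatedly scans the whole remaining list with min(key=len) and removes each pick (quadratic selection); B sorts the list once by length (stable sort reproduces A's first-minimal tie-breaking) and takes a single prefix pass; equivalence is about the return value only (A mutates its argument in place, B does not).
import Mathlib
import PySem

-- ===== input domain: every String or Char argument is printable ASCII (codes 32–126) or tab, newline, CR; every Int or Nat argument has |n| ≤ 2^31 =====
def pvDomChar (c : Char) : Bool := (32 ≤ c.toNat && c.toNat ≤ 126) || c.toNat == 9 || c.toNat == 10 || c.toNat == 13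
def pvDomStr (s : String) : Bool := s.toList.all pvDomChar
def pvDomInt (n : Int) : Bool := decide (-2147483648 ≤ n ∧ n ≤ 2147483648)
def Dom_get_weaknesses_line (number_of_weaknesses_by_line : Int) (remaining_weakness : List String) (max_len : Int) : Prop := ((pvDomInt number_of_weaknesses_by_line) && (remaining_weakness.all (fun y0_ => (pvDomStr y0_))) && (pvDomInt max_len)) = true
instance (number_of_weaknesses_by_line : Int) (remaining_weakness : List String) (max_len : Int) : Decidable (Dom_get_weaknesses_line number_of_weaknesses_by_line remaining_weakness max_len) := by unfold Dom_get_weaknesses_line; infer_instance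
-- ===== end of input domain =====

-- B computes A's return value with one stable sort by length instead of A's repeated
-- min()-scan-and-remove; equivalence is about the RETURN value only (A mutates its
-- list argument in place, B does not).


-- length lemma for remove?, cited by the port's decreasing_by
theorem pv_remove?_length {l l' : List String} {v : String}
    (h : PySem.List.remove? l v = some l') : l'.length + 1 = l.length := by
  induction l generalizing l' with
  | nil =>
    have : PySem.List.remove? ([] : List String) v = none :=
      (PySem.List.remove?_eq_none_iff _ _).mpr (by simp)
    rw [this] at h; cases h
  | cons x t ih =>
    by_cases hx : x = v
    · subst hx; rw [PySem.List.remove?_cons_self] at h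
      cases h; simp
    · rw [PySem.List.remove?_cons_of_ne _ hx] at h
      cases ht : PySem.List.remove? t v with
      | none => rw [ht] at h; simp at h
      | some t' =>
        rw [ht] at h; cases h
        simp [← ih ht]

-- ===== PORT A =====
-- A's while loop: each iteration takes min(remaining, key=len), removes it,
-- appends it to the line if it fits, else breaks (the Python also re-appends the
-- overflowing item to the mutated list; the return value does not depend on that).
def get_weaknesses_line_loop (number_of_weaknesses_by_line max_len : Int)
    (line : String) (i : Int) (l : List String) : String :=
  if l.length ≠ 0 ∧ i + 1 < number_of_weaknesses_by_line then
    match PySem.List.min? l (fun s => PySem.Str.len s) with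
    | none => line
    | some longest =>
      match h2 : PySem.List.remove? l longest with
      | none => line
      | some l' =>
        if PySem.Str.len (line ++ ", " ++ longest) ≤ max_len then
          get_weaknesses_line_loop number_of_weaknesses_by_line max_len
            (line ++ ", " ++ longest) (i + 1) l'
        else line
  else line
termination_by l.length
decreasing_by
  have := pv_remove?_length h2; omega

def get_weaknesses_line (number_of_weaknesses_by_line : Int) (remaining_weakness : List String) (max_len : Int) : String :=
  if remaining_weakness.length ≠ 0 then
    match PySem.List.min? remaining_weakness (fun s => PySem.Str.len s) with
    | none => ""
    | some longest =>
      match PySem.List.remove? remaining_weakness longest with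
      | none => ""
      | some rest =>
        get_weaknesses_line_loop number_of_weaknesses_by_line max_len longest 0 rest
  else ""

-- ===== PORT B =====
-- B: one stable sort by length, then a single pass over the tail with a count.
def get_weaknesses_line_alt_loop (number_of_weaknesses_by_line max_len : Int)
    (line : String) (count : Int) : List String → String
  | [] => line
  | w :: ws =>
    if count ≥ number_of_weaknesses_by_line then line
    else if PySem.Str.len line + 2 + PySem.Str.len w > max_len then line
    else get_weaknesses_line_alt_loop number_of_weaknesses_by_line max_len
          (line ++ ", " ++ w) (count + 1) ws

def get_weaknesses_line_alt (number_of_weaknesses_by_line : Int) (remaining_weakness : List String) (max_len : Int) : String :=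
  match PySem.List.sorted remaining_weakness (fun s => PySem.Str.len s) with
  | [] => ""
  | first :: rest =>
    get_weaknesses_line_alt_loop number_of_weaknesses_by_line max_len first 1 rest

-- ===== PRECONDITION & SPEC =====
def Spec_get_weaknesses_line (number_of_weaknesses_by_line : Int) (remaining_weakness : List String) (max_len : Int) (out : String) : Prop := out = get_weaknesses_line_alt number_of_weaknesses_by_line remaining_weakness max_len
instance (number_of_weaknesses_by_line : Int) (remaining_weakness : List String) (max_len : Int) (out : String) : Decidable (Spec_get_weaknesses_line number_of_weaknesses_by_line remaining_weakness max_len out) := by unfold Spec_get_weaknesses_line; infer_instance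

-- ===== CLAIM (what is proved, stated in full; the proofs are below) =====
def Claim_equal_get_weaknesses_line : Prop := ∀ (number_of_weaknesses_by_line : Int) (remaining_weakness : List String) (max_len : Int), Dom_get_weaknesses_line number_of_weaknesses_by_line remaining_weakness max_len → Spec_get_weaknesses_line number_of_weaknesses_by_line remaining_weakness max_len (get_weaknesses_line number_of_weaknesses_by_line remaining_weakness max_len)

-- ===== LEMMAS AND PROOFS =====

-- stable sort pulled apart one step at the right end
theorem pv_sorted_append_singleton (ys : List String) (x : String) :
    PySem.List.sorted (ys ++ [x]) (fun s => PySem.Str.len s) =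
      PySem.List.insertBy (fun a b => decide (PySem.Str.len a < PySem.Str.len b)) x
        (PySem.List.sorted ys (fun s => PySem.Str.len s)) := by
  rw [PySem.List.sorted_eq_foldl_insertBy, PySem.List.sorted_eq_foldl_insertBy,
    List.foldl_append]
  rfl

theorem pv_min?_app_none {ys : List String} (x : String)
    (h : PySem.List.min? ys (fun s => PySem.Str.len s) = none) :
    PySem.List.min? (ys ++ [x]) (fun s => PySem.Str.len s) = some x := by
  simp only [PySem.List.min?] at h ⊢
  rw [List.foldl_append, h]
  rfl

theorem pv_min?_app_some {ys : List String} (x : String) {m0 : String}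
    (h : PySem.List.min? ys (fun s => PySem.Str.len s) = some m0) :
    PySem.List.min? (ys ++ [x]) (fun s => PySem.Str.len s) =
      if PySem.Str.len x < PySem.Str.len m0 then some x else some m0 := by
  simp only [PySem.List.min?] at h ⊢
  rw [List.foldl_append, h]
  rfl

theorem pv_insertBy_front {bef : String → String → Bool} {x : String} {l : List String}
    (h : ∀ y ∈ l, bef x y) : PySem.List.insertBy bef x l = x :: l := by
  cases l with
  | nil => rfl
  | cons y ys => simp [PySem.List.insertBy, h y (by simp)]

theorem pv_insertBy_cons_not {bef : String → String → Bool} {x y : String} {l : List String}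
    (h : bef x y = false) :
    PySem.List.insertBy bef x (y :: l) = y :: PySem.List.insertBy bef x l := by
  simp [PySem.List.insertBy, h]

-- selection step versus stable sort: sorted xs = (first min by len) :: sorted (xs minus it)
theorem pv_sorted_cons_min (xs : List String) :
    ∀ m, PySem.List.min? xs (fun s => PySem.Str.len s) = some m →
      PySem.List.sorted xs (fun s => PySem.Str.len s) =
        m :: PySem.List.sorted (xs.erase m) (fun s => PySem.Str.len s) := by
  induction xs using List.reverseRecOn with
  | nil => intro m h; simp [PySem.List.min?] at h
  | append_singleton ys x ih =>
    intro m h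
    cases hys : PySem.List.min? ys (fun s => PySem.Str.len s) with
    | none =>
      have hysnil : ys = [] := (PySem.List.min?_eq_none_iff _ _).mp hys
      rw [pv_min?_app_none x hys] at h; cases h
      subst hysnil
      simp [PySem.List.sorted, PySem.List.insertBy]
    | some m0 =>
      rw [pv_min?_app_some x hys] at h
      by_cases hlt : PySem.Str.len x < PySem.Str.len m0
      · rw [if_pos hlt] at h; cases h
        have hmin := PySem.List.min?_isMin hys
        have hxnot : x ∉ ys := by
          intro hmem
          exact absurd (hmin x hmem) (by omega)
        have hfront : ∀ y ∈ PySem.List.sorted ys (fun s => PySem.Str.len s),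
            (fun a b => decide (PySem.Str.len a < PySem.Str.len b)) x y = true := by
          intro y hy
          rw [PySem.List.mem_sorted] at hy
          have := hmin y hy
          simp only [decide_eq_true_eq]; omega
        rw [pv_sorted_append_singleton, pv_insertBy_front hfront,
          List.erase_append_right _ hxnot, List.erase_cons_head, List.append_nil]
      · rw [if_neg hlt] at h; cases h
        have hm0mem : m ∈ ys := PySem.List.min?_mem hys
        have hbef : (fun a b => decide (PySem.Str.len a < PySem.Str.len b)) x m = false := by
          simp only [decide_eq_false_iff_not]; exact hlt
        rw [pv_sorted_append_singleton, ih m hys, pv_insertBy_cons_not hbef,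
          List.erase_append_left _ hm0mem, pv_sorted_append_singleton]

theorem pv_len_append3 (a b c : String) :
    PySem.Str.len (a ++ b ++ c) = PySem.Str.len a + PySem.Str.len b + PySem.Str.len c := by
  simp [PySem.Str.len]; ring

-- A's loop equals B's loop on the sorted remainder (count = i + 1)
theorem pv_loop_eq (n ml : Int) :
    ∀ l line i, get_weaknesses_line_loop n ml line i l =
      get_weaknesses_line_alt_loop n ml line (i + 1)
        (PySem.List.sorted l (fun s => PySem.Str.len s)) := by
  have aux : ∀ (k : Nat) (l : List String), l.length ≤ k → ∀ line i,
      get_weaknesses_line_loop n ml line i l =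
        get_weaknesses_line_alt_loop n ml line (i + 1)
          (PySem.List.sorted l (fun s => PySem.Str.len s)) := by
    intro k
    induction k with
    | zero =>
      intro l hl line i
      have : l = [] := List.eq_nil_of_length_eq_zero (Nat.le_zero.mp hl)
      subst this
      have hs : PySem.List.sorted ([] : List String) (fun s => PySem.Str.len s) = [] := rfl
      rw [hs, get_weaknesses_line_loop, get_weaknesses_line_alt_loop]
      simp
    | succ k ihk =>
      intro l hl line i
      cases hmin : PySem.List.min? l (fun s => PySem.Str.len s) with
      | none =>
        have : l = [] := (PySem.List.min?_eq_none_iff _ _).mp hmin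
        subst this
        have hs : PySem.List.sorted ([] : List String) (fun s => PySem.Str.len s) = [] := rfl
        rw [hs, get_weaknesses_line_loop, get_weaknesses_line_alt_loop]
        simp
      | some m =>
        have hmem : m ∈ l := PySem.List.min?_mem hmin
        have hne : l ≠ [] := by intro h; subst h; simp at hmem
        have hrem : PySem.List.remove? l m = some (l.erase m) :=
          PySem.List.remove?_eq_some_erase l m hmem
        have hsorted := pv_sorted_cons_min l m hmin
        rw [get_weaknesses_line_loop, hsorted]
        by_cases hn : i + 1 < n
        · rw [if_pos ⟨(List.length_pos_of_ne_nil hne).ne', hn⟩]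
          simp only [hmin]
          split
          next h2 => rw [hrem] at h2; cases h2
          next l' h2 =>
          rw [hrem] at h2; cases h2
          rw [get_weaknesses_line_alt_loop]
          have hlen : PySem.Str.len (line ++ ", " ++ m) =
              PySem.Str.len line + 2 + PySem.Str.len m := by
            rw [pv_len_append3]; simp [PySem.Str.len]
          by_cases hfit : PySem.Str.len (line ++ ", " ++ m) ≤ ml
          · rw [if_pos hfit, if_neg (by omega), if_neg (by omega)]
            have hlt : (l.erase m).length = l.length - 1 := List.length_erase_of_mem hmem
            have hp : 0 < l.length := List.length_pos_of_ne_nil hne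
            exact ihk (l.erase m) (by omega) (line ++ ", " ++ m) (i + 1)
          · rw [if_neg hfit, if_neg (by omega), if_pos (by omega)]
        · rw [if_neg (by intro h; exact hn h.2)]
          rw [get_weaknesses_line_alt_loop, if_pos (by omega)]
  intro l line i
  exact aux l.length l le_rfl line i

-- ===== VERDICT (by name: the statement is the Claim_ definition above) =====
theorem get_weaknesses_line_spec : Claim_equal_get_weaknesses_line := by
  intro n rw_ ml _
  unfold Spec_get_weaknesses_line get_weaknesses_line get_weaknesses_line_alt
  cases hmin : PySem.List.min? rw_ (fun s => PySem.Str.len s) with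
  | none =>
    have : rw_ = [] := (PySem.List.min?_eq_none_iff _ _).mp hmin
    subst this
    simp [PySem.List.sorted]
  | some m =>
    have hmem : m ∈ rw_ := PySem.List.min?_mem hmin
    have hne : rw_ ≠ [] := by intro h; subst h; simp at hmem
    have hrem : PySem.List.remove? rw_ m = some (rw_.erase m) :=
      PySem.List.remove?_eq_some_erase rw_ m hmem
    rw [pv_sorted_cons_min rw_ m hmin,
      if_pos (show rw_.length ≠ 0 from (List.length_pos_of_ne_nil hne).ne')]
    simp only [hrem]
    have := pv_loop_eq n ml (rw_.erase m) m 0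
    simpa using this
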